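-- pv_equiv track=rewrite | github.com/bellapukondaveerendra/cs5760-nlp-project-comic-generator | comic_generator.py | parse_script
-- ===== SOURCE A (Python) =====
-- def parse_script(raw_script):
--     """Parse the generated script into panels"""
--     panels = {
--         "Panel 1 (Setup)": "",
--         "Panel 2 (Conflict)": "",
--         "Panel 3 (Twist)": "",
--         "Panel 4 (Punchline)": ""
--     }
--
--     lines = raw_script.split('\n')
--     current_panel = None
--
--     for line in lines:
--         line = line.strip()
--         if "Panel 2" in line:
--             current_panel = "Panel 2 (Conflict)"
--         elif "Panel 3" in line:
--             current_panel = "Panel 3 (Twist)"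
--         elif "Panel 4" in line:
--             current_panel = "Panel 4 (Punchline)"
--         elif current_panel and line:
--             panels[current_panel] += line + " "
--
--     return panels
-- ===== SOURCE B (Python) =====
-- def _marker(line):
--     if "Panel 2" in line:
--         return "Panel 2 (Conflict)"
--     if "Panel 3" in line:
--         return "Panel 3 (Twist)"
--     if "Panel 4" in line:
--         return "Panel 4 (Punchline)"
--     return None
--
--
-- def parse_script(raw_script):
--     """Parse the generated script into panels (segment-based rewrite)."""
--     panels = {
--         "Panel 1 (Setup)": "",
--         "Panel 2 (Conflict)": "",
--         "Panel 3 (Twist)": "",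
--         "Panel 4 (Punchline)": ""
--     }
--     lines = [l.strip() for l in raw_script.split('\n')]
--     i, n = 0, len(lines)
--     while i < n:
--         key = _marker(lines[i])
--         i += 1
--         if key is None:
--             continue
--         seg = []
--         while i < n and _marker(lines[i]) is None:
--             if lines[i]:
--                 seg.append(lines[i] + " ")
--             i += 1
--         panels[key] += "".join(seg)
--     return panels
-- ===== Notes on version B (the rewrite author's own statement) =====
-- stated objective: alternative
-- what changed: Replaces A's single stateful line-by-line fold (a current_panel variable mutated while every line is dispatched through one if-chain) with a locate-then-segment design: strip all lines up front, find each marker line, collect the whole non-marker segment after it into a list and append its join to that panel in one += per segment.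
import Mathlib
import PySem

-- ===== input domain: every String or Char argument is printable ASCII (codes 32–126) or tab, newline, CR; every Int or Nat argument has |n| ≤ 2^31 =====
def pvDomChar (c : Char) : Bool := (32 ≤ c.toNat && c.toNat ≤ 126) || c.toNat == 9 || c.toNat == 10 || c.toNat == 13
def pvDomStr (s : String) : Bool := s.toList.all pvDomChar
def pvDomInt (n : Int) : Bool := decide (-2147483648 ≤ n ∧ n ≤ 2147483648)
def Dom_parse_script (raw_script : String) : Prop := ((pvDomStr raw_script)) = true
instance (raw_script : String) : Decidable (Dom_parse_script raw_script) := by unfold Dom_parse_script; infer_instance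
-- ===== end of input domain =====

-- B replaces A's single stateful fold (a current_panel variable updated per line) with a
-- locate-then-segment decomposition: strip lines up front, find each marker, collect the
-- following non-marker segment into a list and append its join in one step (objective: alternative).


-- ===== PORT A =====
-- loop body of A's for-loop; state = (current_panel, panels).  panels[current_panel] += … is
-- ported as insert of getD ++ …; the key is always present (current_panel is only ever set to
-- one of the dict's literal keys), so getD's default is never used.
def pvStepCore (st : Option String × PySem.Dict String String) (line : String) :
    Option String × PySem.Dict String String :=
  if PySem.Str.isIn "Panel 2" line then (some "Panel 2 (Conflict)", st.2)
  else if PySem.Str.isIn "Panel 3" line then (some "Panel 3 (Twist)", st.2)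
  else if PySem.Str.isIn "Panel 4" line then (some "Panel 4 (Punchline)", st.2)
  else match st.1 with
    | some k =>
      if k ≠ "" ∧ line ≠ "" then (some k, st.2.insert k (st.2.getD k "" ++ line ++ " "))
      else (some k, st.2)
    | none => (none, st.2)

def parse_script (raw_script : String) : List (String × String) :=
  let panels : PySem.Dict String String := PySem.Dict.ofList
    [("Panel 1 (Setup)", ""), ("Panel 2 (Conflict)", ""),
     ("Panel 3 (Twist)", ""), ("Panel 4 (Punchline)", "")]
  let lines := (PySem.Str.split? raw_script "\n").getD []   -- sep "\n" ≠ "", so never none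
  (lines.foldl (fun st line0 => pvStepCore st (PySem.Str.strip line0)) (none, panels)).2.items

-- ===== PORT B =====
def pvMarker (line : String) : Option String :=
  if PySem.Str.isIn "Panel 2" line then some "Panel 2 (Conflict)"
  else if PySem.Str.isIn "Panel 3" line then some "Panel 3 (Twist)"
  else if PySem.Str.isIn "Panel 4" line then some "Panel 4 (Punchline)"
  else none

-- B's inner while-loop: the non-marker segment (each kept line already with its trailing
-- space, as Source B appends) and the remaining lines.
def pvCollect : List String → List String × List String
  | [] => ([], [])
  | l :: rest =>
    match pvMarker l with
    | some _ => ([], l :: rest)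
    | none =>
      let p := pvCollect rest
      if l ≠ "" then ((l ++ " ") :: p.1, p.2) else p

theorem pvCollect_len : ∀ ls : List String, (pvCollect ls).2.length ≤ ls.length := by
  intro ls
  induction ls with
  | nil => simp [pvCollect]
  | cons l rest ih =>
    simp only [pvCollect]
    cases h : pvMarker l with
    | some k => simp
    | none => by_cases hl : l = "" <;> simp [hl] <;> omega

-- B's outer while-loop over the stripped lines.
def pvRunB : List String → PySem.Dict String String → PySem.Dict String String
  | [], d => d
  | l :: rest, d =>
    match pvMarker l with
    | none => pvRunB rest d
    | some k =>
      let p := pvCollect rest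
      pvRunB p.2 (d.insert k (d.getD k "" ++ PySem.Str.join "" p.1))
termination_by ls _ => ls.length
decreasing_by
  all_goals simp only [List.length_cons]
  · omega
  · have := pvCollect_len rest; omega

def parse_script_alt (raw_script : String) : List (String × String) :=
  let panels : PySem.Dict String String := PySem.Dict.ofList
    [("Panel 1 (Setup)", ""), ("Panel 2 (Conflict)", ""),
     ("Panel 3 (Twist)", ""), ("Panel 4 (Punchline)", "")]
  let lines := ((PySem.Str.split? raw_script "\n").getD []).map PySem.Str.strip
  (pvRunB lines panels).items

-- ===== PRECONDITION & SPEC =====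
def Spec_parse_script (raw_script : String) (out : List (String × String)) : Prop := out = parse_script_alt raw_script
instance (raw_script : String) (out : List (String × String)) : Decidable (Spec_parse_script raw_script out) := by unfold Spec_parse_script; infer_instance

-- ===== CLAIM (what is proved, stated in full; the proofs are below) =====
def Claim_equal_parse_script : Prop := ∀ (raw_script : String), Dom_parse_script raw_script → Spec_parse_script raw_script (parse_script raw_script)

-- ===== LEMMAS AND PROOFS =====

-- invariant: unique keys, and the three target keys are present
def pvInv (d : PySem.Dict String String) : Prop :=
  d.keys.Nodup ∧ d.contains "Panel 2 (Conflict)" = true ∧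
    d.contains "Panel 3 (Twist)" = true ∧ d.contains "Panel 4 (Punchline)" = true

theorem pvInv_insert (d : PySem.Dict String String) (k : String) (v : String)
    (h : pvInv d) : pvInv (d.insert k v) := by
  obtain ⟨h1, h2, h3, h4⟩ := h
  refine ⟨PySem.Dict.nodup_keys_insert d k v h1, ?_, ?_, ?_⟩ <;>
    simp [PySem.Dict.contains_insert, h2, h3, h4]

theorem pvMarker_cases (l k : String) (h : pvMarker l = some k) :
    k = "Panel 2 (Conflict)" ∨ k = "Panel 3 (Twist)" ∨ k = "Panel 4 (Punchline)" := by
  unfold pvMarker at h; split_ifs at h <;> simp_all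

theorem pvStep_marker (st : Option String × PySem.Dict String String) (l k : String)
    (h : pvMarker l = some k) : pvStepCore st l = (some k, st.2) := by
  unfold pvMarker at h; unfold pvStepCore; split_ifs at h ⊢ <;> simp_all

theorem pvStep_none_some (d : PySem.Dict String String) (l k : String)
    (h : pvMarker l = none) :
    pvStepCore (some k, d) l =
      if k ≠ "" ∧ l ≠ "" then (some k, d.insert k (d.getD k "" ++ l ++ " "))
      else (some k, d) := by
  unfold pvMarker at h; unfold pvStepCore; split_ifs at h <;> simp_all

theorem pvStep_none_none (d : PySem.Dict String String) (l : String)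
    (h : pvMarker l = none) : pvStepCore (none, d) l = (none, d) := by
  unfold pvMarker at h; unfold pvStepCore; split_ifs at h <;> simp_all

theorem pv_insert_getD_self (d : PySem.Dict String String) (k : String)
    (hn : d.keys.Nodup) (hc : d.contains k = true) :
    d.insert k (d.getD k "") = d := by
  apply PySem.Dict.ext
  rw [PySem.Dict.items_insert_of_contains _ _ hc]
  have : ∀ p ∈ d.items, (if (p.1 == k) = true then (k, d.getD k "") else p) = p := by
    intro p hp
    by_cases hk : (p.1 == k) = true
    · have hke : p.1 = k := by simpa using hk
      have hget : d.get? k = some p.2 := by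
        apply PySem.Dict.get?_of_mem_items _ _ hn
        simpa [← hke] using hp
      have hgd := PySem.Dict.getD_of_get?_eq_some d "" hget
      rw [if_pos hk, hgd, ← hke]
    · simp [hk]
  rw [List.map_congr_left this]
  simp

theorem pv_insert_insert_self (d : PySem.Dict String String) (k v w : String) :
    (d.insert k v).insert k w = d.insert k w := by
  apply PySem.Dict.ext
  by_cases hc : d.contains k = true
  · rw [PySem.Dict.items_insert_of_contains _ _ (by simp),
        PySem.Dict.items_insert_of_contains _ _ hc,
        PySem.Dict.items_insert_of_contains _ _ hc, List.map_map]
    apply List.map_congr_left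
    intro p _
    by_cases hk : p.1 = k
    · simp [hk]
    · simp [hk]
  · have hcf : d.contains k = false := by simpa using hc
    rw [PySem.Dict.items_insert_of_contains _ _ (by simp),
        PySem.Dict.items_insert_of_not_contains _ _ hcf,
        PySem.Dict.items_insert_of_not_contains _ _ hcf]
    have hnk : ∀ p ∈ d.items, (p.1 == k) = false := by
      intro p hp
      by_contra hb
      have hke : p.1 = k := by simpa using hb
      have : k ∈ d.keys := by
        simp only [PySem.Dict.keys]
        exact hke ▸ List.mem_map_of_mem hp
      rw [← PySem.Dict.contains_iff_mem_keys] at this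
      simp [this] at hcf
    rw [List.map_append]
    congr 1
    · have : ∀ p ∈ d.items, (if (p.1 == k) = true then (k, w) else p) = p := by
        intro p hp; simp [hnk p hp]
      rw [List.map_congr_left this]
      simp
    · simp

theorem pv_join_flatten (l : List String) :
    PySem.Str.join "" l = String.ofList ((l.map String.toList).flatten) := by
  simp [PySem.Str.join, PySem.Chars.join]
  induction l with
  | nil => rfl
  | cons a l ih => simp [List.intercalate] at *; cases l <;> simp_all

theorem pv_join_cons (a : String) (l : List String) :
    PySem.Str.join "" (a :: l) = a ++ PySem.Str.join "" l := by
  simp [pv_join_flatten]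

theorem pv_run_some : ∀ (ls : List String) (k : String) (d : PySem.Dict String String),
    pvInv d → d.contains k = true → k ≠ "" →
    (ls.foldl pvStepCore (some k, d)).2
      = pvRunB (pvCollect ls).2
          (d.insert k (d.getD k "" ++ PySem.Str.join "" (pvCollect ls).1)) := by
  intro ls
  induction ls with
  | nil =>
    intro k d hinv hc hk
    simp [pvCollect, pvRunB, PySem.Str.join, PySem.Chars.join, List.intercalate,
      pv_insert_getD_self d k hinv.1 hc]
  | cons l rest ih =>
    intro k d hinv hc hk
    cases h : pvMarker l with
    | some k' =>
      have hfix : d.insert k (d.getD k "" ++ PySem.Str.join "" ([] : List String)) = d := by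
        simpa [PySem.Str.join, PySem.Chars.join, List.intercalate]
          using pv_insert_getD_self d k hinv.1 hc
      have hc' : d.contains k' = true := by
        rcases pvMarker_cases l k' h with h' | h' | h' <;> simp [h', hinv.2.1, hinv.2.2.1, hinv.2.2.2]
      have hk' : k' ≠ "" := by
        rcases pvMarker_cases l k' h with h' | h' | h' <;> simp [h']
      simp only [List.foldl_cons, pvStep_marker _ l k' h]
      rw [ih k' d hinv hc' hk']
      simp only [pvCollect, h, hfix]
      conv_rhs => rw [pvRunB]
      simp [h]
    | none =>
      by_cases hl : l = ""
      · subst hl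
        simp only [List.foldl_cons, pvStep_none_some d "" k h]
        rw [if_neg (by simp)]
        rw [ih k d hinv hc hk]
        simp [pvCollect, h]
      · have hcond : (k ≠ "" ∧ l ≠ "") := ⟨hk, hl⟩
        simp only [List.foldl_cons, pvStep_none_some d l k h, if_pos hcond]
        set d' := d.insert k (d.getD k "" ++ l ++ " ") with hd'
        have hinv' : pvInv d' := pvInv_insert d k _ hinv
        have hc' : d'.contains k = true := by simp [hd']
        rw [ih k d' hinv' hc' hk]
        simp only [pvCollect, h, if_pos hl]
        congr 1
        rw [hd', pv_insert_insert_self]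
        congr 1
        rw [PySem.Dict.getD_insert, if_pos rfl, pv_join_cons]
        apply String.ext
        simp

theorem pv_run_none : ∀ (ls : List String) (d : PySem.Dict String String),
    pvInv d → (ls.foldl pvStepCore (none, d)).2 = pvRunB ls d := by
  intro ls
  induction ls with
  | nil => intro d _; simp [pvRunB]
  | cons l rest ih =>
    intro d hinv
    cases h : pvMarker l with
    | none =>
      simp only [List.foldl_cons, pvStep_none_none d l h]
      rw [ih d hinv, pvRunB]
      simp [h]
    | some k =>
      have hc : d.contains k = true := by
        rcases pvMarker_cases l k h with h' | h' | h' <;> simp [h', hinv.2.1, hinv.2.2.1, hinv.2.2.2]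
      have hk : k ≠ "" := by
        rcases pvMarker_cases l k h with h' | h' | h' <;> simp [h']
      simp only [List.foldl_cons, pvStep_marker _ l k h]
      rw [pv_run_some rest k d hinv hc hk]
      conv_rhs => rw [pvRunB]
      simp [h]

-- ===== VERDICT (by name: the statement is the Claim_ definition above) =====
theorem parse_script_spec : Claim_equal_parse_script := by
  unfold Claim_equal_parse_script
  intro raw _
  unfold Spec_parse_script
  simp only [parse_script, parse_script_alt]
  rw [← List.foldl_map]
  congr 1
  apply pv_run_none
  refine ⟨by decide, by decide, by decide, by decide⟩
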